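-- pv_equiv track=rewrite | github.com/Jnt0/Cadastro-de-usu-rio | APS Criptografia.py | bin_xor
-- ===== SOURCE A (Python) =====
-- def bin_xor(binario, chave):
--     cifrado = ''
--     for x,y in zip(binario, chave):  # Percorre cada posição da lista de binarios.
--         for i,j in zip(x, y):  # Percorre cada posição de binarios individualmente.
--             xor = int(i) ^ int(j)  # Calcula o xor
--             cifrado = cifrado + str(xor)  # Concatena o resultado
--     # distribui os binarios em uma lista
--     partes = []
--     for index in range(0, len(cifrado), 8):
--         partes.append(cifrado[index : index + 8])
--     return partes
-- ===== SOURCE B (Python) =====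
-- def bin_xor(binario, chave):
--     # One streaming pass: XOR bits go into a byte buffer that is flushed
--     # into `partes` every 8 characters, instead of building the whole
--     # cipher string first and re-slicing it afterwards.
--     partes = []
--     buf = []
--     for x, y in zip(binario, chave):
--         for i, j in zip(x, y):
--             for c in str(int(i) ^ int(j)):
--                 buf.append(c)
--                 if len(buf) == 8:
--                     partes.append(''.join(buf))
--                     buf = []
--     if buf:
--         partes.append(''.join(buf))
--     return partes
-- ===== Notes on version B (the rewrite author's own statement) =====
-- stated objective: alternative
-- what changed: B streams XOR characters into an 8-character byte buffer that is flushed into the result as it fills (one pass), instead of A's two phases of building the full cipher string and then re-slicing it with a range loop.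
import Mathlib
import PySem

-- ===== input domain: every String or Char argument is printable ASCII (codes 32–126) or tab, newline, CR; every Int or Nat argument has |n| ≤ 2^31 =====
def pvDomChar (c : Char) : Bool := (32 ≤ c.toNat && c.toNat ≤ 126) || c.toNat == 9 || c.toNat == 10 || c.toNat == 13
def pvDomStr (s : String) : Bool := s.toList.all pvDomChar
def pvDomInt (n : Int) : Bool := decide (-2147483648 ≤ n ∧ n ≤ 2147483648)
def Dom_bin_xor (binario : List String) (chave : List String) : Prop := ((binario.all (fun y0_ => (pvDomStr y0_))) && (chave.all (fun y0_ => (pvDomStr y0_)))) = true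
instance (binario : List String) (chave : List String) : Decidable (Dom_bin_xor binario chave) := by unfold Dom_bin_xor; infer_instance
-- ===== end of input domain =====

-- B streams XOR characters into an 8-char buffer flushed as it fills (one pass)
-- instead of A's build-full-string-then-rechunk two phases; same return value.


-- ===== PORT A =====
-- int(c) for a one-character string; Python raises ValueError on non-digits —
-- exactly those inputs are excluded by Pre_bin_xor, so the default is never reached there.
def pyIntOfChar (c : Char) : Int := (PySem.Int.ofChars? [c]).getD 0

def bin_xor (binario : List String) (chave : List String) : List String :=
  -- phase 1: cifrado = cifrado + str(int(i) ^ int(j)) over both zips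
  let cifrado : List Char :=
    (List.zip binario chave).foldl (fun acc xy =>
      (List.zip xy.1.toList xy.2.toList).foldl (fun acc2 ij =>
        acc2 ++ PySem.Int.toChars (PySem.Int.bxor (pyIntOfChar ij.1) (pyIntOfChar ij.2))) acc) []
  -- phase 2: for index in range(0, len(cifrado), 8): partes.append(cifrado[index:index+8])
  (PySem.List.pyRange 0 (cifrado.length : Int) 8).foldl (fun partes index =>
    partes ++ [String.ofList (PySem.List.slice cifrado (some index) (some (index + 8)))]) []

-- ===== PORT B =====
-- buf.append(c); if len(buf) == 8: partes.append(''.join(buf)); buf = []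
def bxStep (st : List String × List Char) (c : Char) : List String × List Char :=
  let buf := st.2 ++ [c]
  if buf.length = 8 then (st.1 ++ [String.ofList buf], []) else (st.1, buf)

def bin_xor_alt (binario : List String) (chave : List String) : List String :=
  let st : List String × List Char :=
    (List.zip binario chave).foldl (fun st xy =>
      (List.zip xy.1.toList xy.2.toList).foldl (fun st ij =>
        (PySem.Int.toChars (PySem.Int.bxor (pyIntOfChar ij.1) (pyIntOfChar ij.2))).foldl bxStep st) st) ([], [])
  if st.2 = [] then st.1 else st.1 ++ [String.ofList st.2]

-- ===== PRECONDITION & SPEC =====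
-- Pre_ excludes exactly the inputs where Python's int() raises ValueError:
-- some zipped character pair contains a non-digit character.
def Pre_bin_xor (binario : List String) (chave : List String) : Prop :=
  ∀ p ∈ List.zip binario chave, ∀ q ∈ List.zip p.1.toList p.2.toList,
    q.1.isDigit = true ∧ q.2.isDigit = true
instance (binario : List String) (chave : List String) : Decidable (Pre_bin_xor binario chave) := by
  unfold Pre_bin_xor; infer_instance

def pvWitness_bin_xor : List String × List String := (["0111", "1010"], ["1101", "0110"])

def Spec_bin_xor (binario : List String) (chave : List String) (out : List String) : Prop := out = bin_xor_alt binario chave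
instance (binario : List String) (chave : List String) (out : List String) : Decidable (Spec_bin_xor binario chave out) := by unfold Spec_bin_xor; infer_instance

-- ===== CLAIM (what is proved, stated in full; the proofs are below) =====
def Claim_equal_bin_xor : Prop := ∀ (binario : List String) (chave : List String), Dom_bin_xor binario chave → Pre_bin_xor binario chave → Spec_bin_xor binario chave (bin_xor binario chave)

-- ===== LEMMAS AND PROOFS =====

-- the stream of XOR characters both programs produce, as one flat list
def xorChars (binario : List String) (chave : List String) : List Char :=
  (List.zip binario chave).flatMap (fun xy =>
    (List.zip xy.1.toList xy.2.toList).flatMap (fun ij =>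
      PySem.Int.toChars (PySem.Int.bxor (pyIntOfChar ij.1) (pyIntOfChar ij.2))))

-- successive 8-char chunks (the last one possibly shorter)
def chunk8 (l : List Char) : List String :=
  if l = [] then [] else String.ofList (l.take 8) :: chunk8 (l.drop 8)
termination_by l.length
decreasing_by
  rename_i h
  have : l.length ≠ 0 := fun h0 => h (List.eq_nil_of_length_eq_zero h0)
  simp [List.length_drop]; omega

-- B's end-of-loop flush
def bxFinish (st : List String × List Char) : List String :=
  if st.2 = [] then st.1 else st.1 ++ [String.ofList st.2]

lemma cifrado_eq (binario chave : List String) :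
    (List.zip binario chave).foldl (fun acc xy =>
      (List.zip xy.1.toList xy.2.toList).foldl (fun acc2 ij =>
        acc2 ++ PySem.Int.toChars (PySem.Int.bxor (pyIntOfChar ij.1) (pyIntOfChar ij.2))) acc) [] =
    xorChars binario chave := by
  simp [xorChars, List.flatMap_def]

lemma alt_fold_eq (binario chave : List String) (st : List String × List Char) :
    (List.zip binario chave).foldl (fun st xy =>
      (List.zip xy.1.toList xy.2.toList).foldl (fun st ij =>
        (PySem.Int.toChars (PySem.Int.bxor (pyIntOfChar ij.1) (pyIntOfChar ij.2))).foldl bxStep st) st) st =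
    (xorChars binario chave).foldl bxStep st := by
  simp only [xorChars, List.foldl_flatMap]

lemma chunk8_flat (buf rest : List Char) (h : buf.length = 8) :
    chunk8 (buf ++ rest) = String.ofList buf :: chunk8 rest := by
  rw [chunk8]
  have hne : buf ++ rest ≠ [] := by
    intro h0
    have hb : buf = [] := (List.append_eq_nil_iff.mp h0).1
    rw [hb] at h
    simp at h
  simp only [if_neg hne, List.take_left' h, List.drop_left' h]

-- invariant of B's streaming loop: with a partially filled buffer (< 8 chars),
-- folding the remaining characters and flushing at the end yields the chunking
-- of buffer-plus-remaining, appended to the parts already emitted.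
lemma stream_chunk : ∀ (cs : List Char) (parts : List String) (buf : List Char),
    buf.length < 8 →
    bxFinish (cs.foldl bxStep (parts, buf)) = parts ++ chunk8 (buf ++ cs) := by
  intro cs
  induction cs with
  | nil =>
    intro parts buf h
    rw [chunk8]
    by_cases hb : buf = []
    · simp [hb, bxFinish]
    · have h1 : buf.take 8 = buf := List.take_of_length_le (by omega)
      have h2 : buf.drop 8 = [] := List.drop_eq_nil_of_le (by omega)
      simp [hb, h1, h2, chunk8, bxFinish]
  | cons c cs ih =>
    intro parts buf h
    simp only [List.foldl_cons]
    by_cases h8 : (buf ++ [c]).length = 8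
    · have hst : bxStep (parts, buf) c = (parts ++ [String.ofList (buf ++ [c])], []) := by
        simp only [bxStep]
        rw [if_pos h8]
      rw [hst, ih _ _ (by simp)]
      have hsplit : buf ++ c :: cs = (buf ++ [c]) ++ cs := by simp
      rw [hsplit, chunk8_flat _ _ h8]
      simp
    · have hst : bxStep (parts, buf) c = (parts, buf ++ [c]) := by
        simp only [bxStep]
        rw [if_neg h8]
      have hlt : (buf ++ [c]).length < 8 := by
        simp only [List.length_append, List.length_singleton] at h8 ⊢
        omega
      rw [hst, ih _ _ hlt]
      simp

-- A's chunking loop, reduced to a map over List.range, computes chunk8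
lemma chunkM : ∀ (l : List Char),
    (List.range (if (0:Int) < (l.length : Int) then (((l.length : Int) - 0 + 8 - 1) / 8).toNat else 0)).map
      (fun k => String.ofList ((l.drop (8 * k)).take 8)) = chunk8 l := by
  intro l
  induction l using chunk8.induct with
  | case1 => simp [chunk8]
  | case2 l hnil ih =>
    rw [chunk8, if_neg hnil]
    have hlen : 0 < l.length := List.length_pos_iff.mpr hnil
    have hM : (((l.length : Int) - 0 + 8 - 1) / 8).toNat
        = (if (0:Int) < ((l.drop 8).length : Int)
            then ((((l.drop 8).length : Int) - 0 + 8 - 1) / 8).toNat else 0) + 1 := by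
      simp only [List.length_drop]
      split <;> push_cast <;> omega
    rw [if_pos (by exact_mod_cast hlen), hM, List.range_succ_eq_map, List.map_cons, List.map_map]
    refine List.cons_eq_cons.mpr ⟨by simp, ?_⟩
    rw [← ih]
    apply List.map_congr_left
    intro k _
    simp only [Function.comp_apply, List.drop_drop]
    congr 3
    omega

lemma chunkA_eq_chunk8 (l : List Char) :
    (PySem.List.pyRange 0 (l.length : Int) 8).foldl (fun partes index =>
      partes ++ [String.ofList (PySem.List.slice l (some index) (some (index + 8)))]) [] =
    chunk8 l := by
  rw [PySem.List.foldl_append_singleton_eq_map, List.nil_append,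
      PySem.List.pyRange_of_pos 0 (l.length : Int) (by norm_num), List.map_map]
  rw [← chunkM l]
  apply List.map_congr_left
  intro k _
  simp only [Function.comp]
  have h1 : (0:Int) + 8 * (k : Int) = ((8 * k : Nat) : Int) := by push_cast; ring
  have h2 : (0:Int) + 8 * (k : Int) + 8 = ((8 * k + 8 : Nat) : Int) := by push_cast; ring
  rw [h2, h1, PySem.List.slice_natCast]
  congr 2
  omega

-- ===== VERDICT (by name: the statement is the Claim_ definition above) =====
theorem bin_xor_spec : Claim_equal_bin_xor := by
  intro binario chave _ _
  show bin_xor binario chave = bin_xor_alt binario chave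
  have hB := stream_chunk (xorChars binario chave) [] [] (by norm_num)
  simp only [List.nil_append, bxFinish] at hB
  simp only [bin_xor, bin_xor_alt, cifrado_eq, alt_fold_eq, chunkA_eq_chunk8]
  exact hB.symm
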